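-- pv_equiv track=rewrite | github.com/Subhash3/CodeChef | AUG_LTIME/eidi_gifts.py | is_fair
-- ===== SOURCE A (Python) =====
-- def is_fair(n, values) :
--     for i in range(n) :
--         for j in range(i+1, n) :
--             if values[i] < values[j] and values[i+n] >= values[j+n] :
--                 return "NOT FAIR"
--             elif values[i] > values[j] and values[i+n] <= values[j+n] :
--                 return "NOT FAIR"
--             elif values[i] == values[j] and values[i+n] != values[j+n] :
--                 return "NOT FAIR"
--     return "FAIR"
-- ===== SOURCE B (Python) =====
-- def is_fair(n, values):
--     pairs = sorted(zip(values[:n], values[n:2 * n]))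
--     for p, q in zip(pairs, pairs[1:]):
--         if (q[1] <= p[1]) if p[0] < q[0] else (p[1] != q[1]):
--             return "NOT FAIR"
--     return "FAIR"
-- ===== Notes on version B (the rewrite author's own statement) =====
-- stated objective: faster
-- what changed: Replaces the O(n^2) all-pairs consistency scan with sorting the (value, gift) pairs lexicographically and checking only adjacent pairs (strictly increasing second component across distinct firsts, equal second component on ties), which is equivalent by transitivity.
-- outside the precondition, e.g. on is_fair(3, [1, 2, 0, 5, 3]): A returns 'NOT FAIR', B returns 'NOT FAIR'
import Mathlib
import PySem

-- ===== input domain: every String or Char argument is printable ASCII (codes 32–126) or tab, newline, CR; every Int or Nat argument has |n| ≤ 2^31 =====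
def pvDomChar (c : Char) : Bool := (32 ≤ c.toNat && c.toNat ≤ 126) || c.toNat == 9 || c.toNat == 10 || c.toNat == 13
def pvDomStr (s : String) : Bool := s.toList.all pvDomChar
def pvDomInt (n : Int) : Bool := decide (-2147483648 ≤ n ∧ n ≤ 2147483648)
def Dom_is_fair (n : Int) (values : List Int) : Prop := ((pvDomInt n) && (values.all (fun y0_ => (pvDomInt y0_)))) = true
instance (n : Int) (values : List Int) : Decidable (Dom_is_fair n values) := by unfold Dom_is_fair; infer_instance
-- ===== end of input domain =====

-- B replaces A's O(n^2) all-pairs scan by sorting the (value, gift) pairs and checking adjacent pairs only.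

-- ===== PORT A =====
-- the three-branch pair check of A's inner loop body (values[...] via pyGetD; in range under Pre_)
def pvBad (n : Int) (values : List Int) (i j : Int) : Bool :=
  if PySem.List.pyGetD values i 0 < PySem.List.pyGetD values j 0
      && PySem.List.pyGetD values (j+n) 0 ≤ PySem.List.pyGetD values (i+n) 0 then true
  else if PySem.List.pyGetD values j 0 < PySem.List.pyGetD values i 0
      && PySem.List.pyGetD values (i+n) 0 ≤ PySem.List.pyGetD values (j+n) 0 then true
  else if PySem.List.pyGetD values i 0 == PySem.List.pyGetD values j 0
      && PySem.List.pyGetD values (i+n) 0 != PySem.List.pyGetD values (j+n) 0 then true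
  else false

def is_fair (n : Int) (values : List Int) : String :=
  if (PySem.List.pyRange 0 n 1).any (fun i =>
       (PySem.List.pyRange (i+1) n 1).any (fun j => pvBad n values i j))
  then "NOT FAIR" else "FAIR"

-- ===== PORT B =====
-- Source B's loop test: (q[1] <= p[1]) if p[0] < q[0] else (p[1] != q[1])
def pvAdjBad (p q : Int × Int) : Bool := if p.1 < q.1 then q.2 ≤ p.2 else p.2 != q.2

-- Source B's 'for p, q in zip(pairs, pairs[1:])' early-return scan
def pvScan : List (Int × Int) → Bool
  | p :: q :: rest => if pvAdjBad p q then true else pvScan (q :: rest)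
  | _ => false

def is_fair_alt (n : Int) (values : List Int) : String :=
  let a := PySem.List.slice values none (some n)
  let b := PySem.List.slice values (some n) (some (2*n))
  let pairs := PySem.List.sorted2 (a.zip b) (fun p => p.1) (fun p => p.2) false
  if pvScan pairs then "NOT FAIR" else "FAIR"

-- ===== PRECONDITION & SPEC =====
-- Pre_ excludes malformed inputs with 2 ≤ n and len(values) < 2*n: there A raises IndexError on
-- most of them, though it may return "NOT FAIR" early on a conflict among the indices that do
-- exist before touching an out-of-range one.
def Pre_is_fair (n : Int) (values : List Int) : Prop := n ≤ 1 ∨ 2*n ≤ values.length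
instance (n : Int) (values : List Int) : Decidable (Pre_is_fair n values) := by
  unfold Pre_is_fair; infer_instance
def pvWitness_is_fair : Int × List Int := (2, [1, 2, 3, 4])

def Spec_is_fair (n : Int) (values : List Int) (out : String) : Prop := out = is_fair_alt n values
instance (n : Int) (values : List Int) (out : String) : Decidable (Spec_is_fair n values out) := by
  unfold Spec_is_fair; infer_instance

-- ===== CLAIM (what is proved, stated in full; the proofs are below) =====
def Claim_equal_is_fair : Prop := ∀ (n : Int) (values : List Int), Dom_is_fair n values → Pre_is_fair n values → Spec_is_fair n values (is_fair n values)

-- ===== LEMMAS AND PROOFS =====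

-- the symmetric "same order" condition on two (value, gift) pairs
def pvCons (p q : Int × Int) : Prop :=
  (p.1 < q.1 → p.2 < q.2) ∧ (q.1 < p.1 → q.2 < p.2) ∧ (p.1 = q.1 → p.2 = q.2)

-- lexicographic non-strict order on pairs
def pvLle (p q : Int × Int) : Prop := p.1 < q.1 ∨ (p.1 = q.1 ∧ p.2 ≤ q.2)

theorem pvCons_symm : Symmetric pvCons := by
  intro p q h; unfold pvCons at *; omega

-- sorted2's comparator
theorem pvBefore_eq (p q : Int × Int) :
    (decide (p.1 < q.1) || (!decide (q.1 < p.1) && decide (p.2 < q.2))) = true ↔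
      (p.1 < q.1 ∨ (p.1 = q.1 ∧ p.2 < q.2)) := by
  simp; omega

theorem pairwise_lle_insertBy (x : Int × Int) (acc : List (Int × Int))
    (h : acc.Pairwise pvLle) :
    (PySem.List.insertBy
        (fun a b => decide (a.1 < b.1) || (!decide (b.1 < a.1) && decide (a.2 < b.2))) x acc).Pairwise pvLle := by
  induction acc with
  | nil => simp [PySem.List.insertBy, pvLle]
  | cons y ys ih =>
    rw [List.pairwise_cons] at h
    by_cases hb : (decide (x.1 < y.1) || (!decide (y.1 < x.1) && decide (x.2 < y.2))) = true
    · rw [show PySem.List.insertBy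
          (fun a b => decide (a.1 < b.1) || (!decide (b.1 < a.1) && decide (a.2 < b.2))) x (y :: ys)
          = x :: y :: ys by simp [PySem.List.insertBy, hb]]
      rw [pvBefore_eq] at hb
      refine List.pairwise_cons.2 ⟨?_, List.pairwise_cons.2 h⟩
      intro z hz
      rcases List.mem_cons.1 hz with rfl | hz
      · unfold pvLle; omega
      · have := h.1 z hz; unfold pvLle at *; omega
    · rw [show PySem.List.insertBy
          (fun a b => decide (a.1 < b.1) || (!decide (b.1 < a.1) && decide (a.2 < b.2))) x (y :: ys)
          = y :: PySem.List.insertBy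
              (fun a b => decide (a.1 < b.1) || (!decide (b.1 < a.1) && decide (a.2 < b.2))) x ys
          by simp [PySem.List.insertBy, hb]]
      refine List.pairwise_cons.2 ⟨?_, ih h.2⟩
      intro z hz
      rw [PySem.List.mem_insertBy] at hz
      rcases hz with rfl | hz
      · rw [pvBefore_eq] at hb; unfold pvLle; omega
      · exact h.1 z hz

theorem pairwise_lle_sorted2 (xs : List (Int × Int)) :
    (PySem.List.sorted2 xs (fun p => p.1) (fun p => p.2) false).Pairwise pvLle := by
  unfold PySem.List.sorted2
  simp only [Bool.false_eq_true, if_false]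
  suffices h : ∀ acc : List (Int × Int), acc.Pairwise pvLle →
      (xs.foldl (fun acc x => PySem.List.insertBy
        (fun a b => decide (a.1 < b.1) || (!decide (b.1 < a.1) && decide (a.2 < b.2))) x acc) acc).Pairwise pvLle by
    exact h [] (by simp)
  induction xs with
  | nil => intro acc h; simpa using h
  | cons x xs ih =>
    intro acc h
    exact ih _ (pairwise_lle_insertBy x acc h)

-- pvScan = false ↔ every adjacent pair passes
theorem pvScan_eq_false_iff (s : List (Int × Int)) :
    pvScan s = false ↔ s.IsChain (fun p q => pvAdjBad p q = false) := by
  induction s with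
  | nil => simp [pvScan]
  | cons p t ih =>
    cases t with
    | nil => simp [pvScan]
    | cons q rest =>
      by_cases hb : pvAdjBad p q = true
      · simp [pvScan, hb, List.isChain_cons_cons]
      · rw [Bool.not_eq_true] at hb
        simp [pvScan, hb, List.isChain_cons_cons, ih]

theorem pvAdjBad_false_iff (p q : Int × Int) :
    pvAdjBad p q = false ↔ ((p.1 < q.1 → p.2 < q.2) ∧ (¬ p.1 < q.1 → p.2 = q.2)) := by
  unfold pvAdjBad
  by_cases h : p.1 < q.1
  · simp only [if_pos h]
    simp [h]
  · simp only [if_neg h]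
    simp [h]

theorem isChain_and {α : Type} {P Q : α → α → Prop} :
    ∀ {s : List α}, s.IsChain P → s.IsChain Q → s.IsChain (fun a b => P a b ∧ Q a b)
  | [], _, _ => by simp
  | [a], _, _ => by simp
  | a :: b :: t, hp, hq => by
    rw [List.isChain_cons_cons] at *
    exact ⟨⟨hp.1, hq.1⟩, isChain_and hp.2 hq.2⟩

-- the key list-level equivalence: all-pairs consistency ↔ adjacent consistency of the sorted list
theorem pairwise_cons_iff_scan (L : List (Int × Int)) :
    L.Pairwise pvCons ↔
      pvScan (PySem.List.sorted2 L (fun p => p.1) (fun p => p.2) false) = false := by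
  set s := PySem.List.sorted2 L (fun p => p.1) (fun p => p.2) false with hs
  have hperm : s.Perm L := PySem.List.sorted2_perm L _ _ _
  have hsorted : s.Pairwise pvLle := pairwise_lle_sorted2 L
  rw [pvScan_eq_false_iff]
  constructor
  · intro h
    have hps : s.Pairwise pvCons := (hperm.pairwise_iff (fun {a b} h => pvCons_symm h)).2 h
    have hand : s.Pairwise (fun p q => pvCons p q ∧ pvLle p q) := hps.and hsorted
    refine (hand.imp ?_).isChain
    rintro p q ⟨hc, hl⟩
    rw [pvAdjBad_false_iff]
    unfold pvCons at hc; unfold pvLle at hl; omega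
  · intro h
    -- strengthen adjacent info to a transitive relation, propagate along the chain, then weaken
    have hchain : s.IsChain (fun p q => (p.1 < q.1 ∧ p.2 < q.2) ∨ (p.1 = q.1 ∧ p.2 = q.2)) := by
      refine (isChain_and h hsorted.isChain).imp ?_
      rintro p q ⟨hok, hl⟩
      rw [pvAdjBad_false_iff] at hok
      unfold pvLle at hl; omega
    have hpw : s.Pairwise (fun p q : Int × Int => (p.1 < q.1 ∧ p.2 < q.2) ∨ (p.1 = q.1 ∧ p.2 = q.2)) := by
      have htr : Trans (fun p q : Int × Int => (p.1 < q.1 ∧ p.2 < q.2) ∨ (p.1 = q.1 ∧ p.2 = q.2))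
          (fun p q : Int × Int => (p.1 < q.1 ∧ p.2 < q.2) ∨ (p.1 = q.1 ∧ p.2 = q.2))
          (fun p q : Int × Int => (p.1 < q.1 ∧ p.2 < q.2) ∨ (p.1 = q.1 ∧ p.2 = q.2)) :=
        ⟨by intro p q r h1 h2; omega⟩
      exact (@List.isChain_iff_pairwise _ _ _ htr).1 hchain
    have hps : s.Pairwise pvCons := hpw.imp (by intro p q h'; unfold pvCons; omega)
    exact (hperm.pairwise_iff (fun {a b} h => pvCons_symm h)).1 hps

-- pvBad, read back as the symmetric consistency predicate on pyGetD values
theorem pvBadCore (vi vj wi wj : Int) :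
    (if vi < vj && wj ≤ wi then true
     else if vj < vi && wi ≤ wj then true
     else if vi == vj && wi != wj then true
     else false) = false ↔
      ((vi < vj → wi < wj) ∧ (vj < vi → wj < wi) ∧ (vi = vj → wi = wj)) := by
  rcases lt_trichotomy vi vj with h | h | h
  · have h2 : ¬ vj < vi := by omega
    have h3 : ¬ vi = vj := by omega
    simp [h, h2, h3]
  · have h2 : ¬ vi < vj := by omega
    have h3 : ¬ vj < vi := by omega
    simp [h]
  · have h2 : ¬ vi < vj := by omega
    have h3 : ¬ vi = vj := by omega
    simp [h, h2, h3]

theorem pvBad_false_iff (n i j : Int) (values : List Int) :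
    pvBad n values i j = false ↔
      pvCons (PySem.List.pyGetD values i 0, PySem.List.pyGetD values (i+n) 0)
             (PySem.List.pyGetD values j 0, PySem.List.pyGetD values (j+n) 0) := by
  unfold pvBad pvCons
  exact pvBadCore _ _ _ _

-- length of values[n:2n] when n ≤ 1
theorem short_slice_len (len : Nat) (n : Int) (hn : n ≤ 1) :
    PySem.List.clampIdx len (2*n) - PySem.List.clampIdx len n ≤ 1 := by
  unfold PySem.List.clampIdx
  split_ifs <;> omega

-- the two boolean conditions agree on every admitted input
theorem conds_agree (n : Int) (values : List Int) (hpre : n ≤ 1 ∨ 2*n ≤ (values.length : Int)) :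
    ((PySem.List.pyRange 0 n 1).any (fun i =>
        (PySem.List.pyRange (i+1) n 1).any (fun j => pvBad n values i j)) = false ↔
      pvScan (PySem.List.sorted2
        ((PySem.List.slice values none (some n)).zip
          (PySem.List.slice values (some n) (some (2*n)))) (fun p => p.1) (fun p => p.2) false) = false) := by
  set L := (PySem.List.slice values none (some n)).zip
      (PySem.List.slice values (some n) (some (2*n))) with hL
  rw [← pairwise_cons_iff_scan]
  by_cases hn : n ≤ 1
  · constructor
    · intro _
      have hblen : (PySem.List.slice values (some n) (some (2*n))).length ≤ 1 := by
        rw [PySem.List.length_slice]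
        exact short_slice_len values.length n hn
      have hLlen : L.length ≤ 1 := by
        rw [hL, List.length_zip]; omega
      match L, hLlen with
      | [], _ => exact List.Pairwise.nil
      | [x], _ => exact List.pairwise_singleton pvCons x
    · intro _
      rcases Int.lt_or_le n 1 with h1 | h1
      · rw [PySem.List.pyRange_one_eq_nil (by omega)]; rfl
      · have hn1 : n = 1 := by omega
        subst hn1
        have e1 : PySem.List.pyRange 0 1 1 = [0] := by decide
        simp [e1]
  · -- main case: 2 ≤ n and 2*n ≤ len
    have hlen : 2*n ≤ (values.length : Int) := by rcases hpre with h | h; omega; exact h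
    have hn2 : 2 ≤ n := by omega
    set m := n.toNat with hm
    have hmn : (m : Int) = n := by omega
    have hmlen : 2*m ≤ values.length := by omega
    have ha : PySem.List.slice values none (some n) = values.take m :=
      PySem.List.slice_to values (by omega)
    have hb : PySem.List.slice values (some n) (some (2*n)) = (values.drop m).take m := by
      rw [PySem.List.slice_toNat values (by omega) (by omega)]
      have h2 : (2*n).toNat - n.toNat = m := by omega
      rw [h2]
    have hLlen : L.length = m := by
      rw [hL, ha, hb, List.length_zip, List.length_take, List.length_take, List.length_drop]
      omega
    have hget : ∀ (k : Nat) (hk : k < L.length),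
        L[k] = (PySem.List.pyGetD values (k : Int) 0, PySem.List.pyGetD values ((k : Int)+n) 0) := by
      intro k hk
      have hkm : k < m := by omega
      have hcast : ((k : Int) + n).toNat = m + k := by omega
      show ((PySem.List.slice values none (some n)).zip
          (PySem.List.slice values (some n) (some (2*n))))[k]'(hk) = _
      rw [List.getElem_zip]
      have e1 : (PySem.List.slice values none (some n))[k]'(by rw [ha]; simp; omega)
          = values[k]'(by omega) := by
        simp [ha]
      have e2 : (PySem.List.slice values (some n) (some (2*n)))[k]'(by rw [hb]; simp; omega)
          = values[m + k]'(by omega) := by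
        simp [hb]
      rw [e1, e2]
      have p1 : PySem.List.pyGetD values (k : Int) 0 = values[k]'(by omega) := by
        rw [PySem.List.pyGetD_eq_getElem values 0 (by omega) (by omega)]
        simp
      have p2 : PySem.List.pyGetD values ((k : Int) + n) 0 = values[m + k]'(by omega) := by
        rw [PySem.List.pyGetD_eq_getElem values 0 (by omega) (by omega)]
        simp [hcast]
      rw [p1, p2]
    constructor
    · intro hany
      rw [List.pairwise_iff_getElem]
      intro i j hi hj hij
      rw [List.any_eq_false] at hany
      have h1 := hany (i : Int) (by rw [PySem.List.mem_pyRange_one]; constructor <;> omega)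
      rw [Bool.not_eq_true, List.any_eq_false] at h1
      have h2 := h1 (j : Int) (by rw [PySem.List.mem_pyRange_one]; constructor <;> omega)
      rw [Bool.not_eq_true] at h2
      rw [pvBad_false_iff] at h2
      rw [hget i hi, hget j hj]
      exact h2
    · intro hpw
      rw [List.pairwise_iff_getElem] at hpw
      rw [List.any_eq_false]
      intro i hi
      rw [PySem.List.mem_pyRange_one] at hi
      rw [Bool.not_eq_true, List.any_eq_false]
      intro j hj
      rw [PySem.List.mem_pyRange_one] at hj
      rw [Bool.not_eq_true, pvBad_false_iff]
      have hii : i = ((i.toNat : Nat) : Int) := by omega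
      have hjj : j = ((j.toNat : Nat) : Int) := by omega
      have hi' : i.toNat < L.length := by omega
      have hj' : j.toNat < L.length := by omega
      have := hpw i.toNat j.toNat hi' hj' (by omega)
      rw [hget i.toNat hi', hget j.toNat hj'] at this
      rw [hii, hjj]
      exact this

-- ===== VERDICT (by name: the statement is the Claim_ definition above) =====
theorem is_fair_spec : Claim_equal_is_fair := by
  intro n values _ hpre
  show is_fair n values = is_fair_alt n values
  unfold is_fair is_fair_alt
  have h := conds_agree n values hpre
  set A := (PySem.List.pyRange 0 n 1).any (fun i =>
      (PySem.List.pyRange (i+1) n 1).any (fun j => pvBad n values i j)) with hA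
  set B := pvScan (PySem.List.sorted2
      ((PySem.List.slice values none (some n)).zip
        (PySem.List.slice values (some n) (some (2*n)))) (fun p => p.1) (fun p => p.2) false) with hB
  have hAB : A = B := by
    cases hA' : A <;> cases hB' : B <;> simp_all
  rw [hAB]
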